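-- pv_equiv track=rewrite | github.com/Sadeeptha-B/Advanced-Algorithms | 30769140/q1/q1.py | z_suffix_base
-- ===== SOURCE A (Python) =====
-- def z_suffix_base(st):
--     n = len(st)
--     z_array = [None] * n
--
--     if n == 0:
--         return z_array
--
--     z_array[-1] = n
--     l, r = n - 1, n - 1
--
--     for i in range(len(st)-2, -1, -1):
--         in_box = l <= i
--
--         if in_box:
--             ind = n - (r-i) - 1
--             rem = i - l + 1
--
--             if z_array[ind] < rem:
--                 z_array[i] = z_array[ind]
--
--             elif z_array[ind] > rem:
--                 z_array[i] = rem
--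
--             else:
--                 z_array[i] = rem + compare_matches_invert(st, st, (n-1) - (i-l) -1, l-1)
--                 l = i - z_array[i] + 1
--                 r = i
--
--         else:
--             z_array[i] = compare_matches_invert(st, st, n-1, i)
--             l = i - z_array[i] + 1
--             r = i
--
--     return z_array
--
--
--
--
-- # Helper functions
-- # =========================================================================================================
--
-- # def compare_matches(st, start, end):
-- #     count = 0
--
-- #     while end < len(st) and st[start] == st[end]:
-- #         count += 1
-- #         start += 1
-- #         end+= 1
--
-- #     return count
--
--
-- # def compare_matches_invert(st, start, end):
--     count = 0
--
--     while start >= 0  and st[start] == st[end]: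
--         count += 1
--         start -= 1
--         end -= 1
--
--     return count
--
-- def compare_matches_invert(ref, pat, start, i):
--     count = 0
--
--     while start >= 0 and i >= 0:
--         if pat[start] != ref[i]:
--             break
--         count += 1
--         start -= 1
--         i -= 1
--
--     return count
-- ===== SOURCE B (Python) =====
-- def _overlap(st, i):
--     # length of the longest common suffix of st[:i+1] and st
--     j = len(st) - 1
--     c = 0
--     while i >= 0 and st[i] == st[j]:
--         c += 1
--         i -= 1
--         j -= 1
--     return c
--
--
-- def z_suffix_base(st):
--     return [_overlap(st, i) for i in range(len(st))]
-- ===== Notes on version B (the rewrite author's own statement) =====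
-- stated objective: simpler
-- what changed: Replaced the right-to-left Z-box algorithm (mutable z_array, box bounds l/r, three reuse cases) by a direct per-index scan: each entry is the longest common suffix of st[:i+1] and st, computed by one backward comparison loop.
import Mathlib
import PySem

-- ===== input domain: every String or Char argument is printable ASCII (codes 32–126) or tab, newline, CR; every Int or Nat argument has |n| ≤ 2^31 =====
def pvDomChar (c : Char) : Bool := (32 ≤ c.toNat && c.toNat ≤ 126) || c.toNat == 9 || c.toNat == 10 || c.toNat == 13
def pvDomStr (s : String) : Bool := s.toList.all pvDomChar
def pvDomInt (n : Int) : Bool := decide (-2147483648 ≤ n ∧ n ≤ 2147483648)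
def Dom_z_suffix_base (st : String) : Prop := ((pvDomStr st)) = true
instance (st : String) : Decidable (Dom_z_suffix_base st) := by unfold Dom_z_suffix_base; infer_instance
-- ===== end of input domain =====

-- B replaces A's right-to-left Z-box scan by a direct per-index longest-common-suffix scan (simpler; not faster).


-- ===== PORT A =====
-- compare_matches_invert(ref, pat, start, i) with ref = pat = the string's characters;
-- every call site keeps both indices < length, so getD is exact there (Python never raises here).
def cmiA (s : List Char) (start i : Int) : Nat :=
  if h : 0 ≤ start ∧ 0 ≤ i then
    if s.getD start.toNat ' ' = s.getD i.toNat ' ' then cmiA s (start - 1) (i - 1) + 1 else 0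
  else 0
termination_by (start + 1).toNat
decreasing_by omega

-- one iteration of A's for-loop, at index i (z_array[ind] is always an int when read, so .getD 0 is exact)
def zStep (s : List Char) (n : Nat) (i : Nat) (z : List (Option Int)) (l r : Int) :
    List (Option Int) × Int × Int :=
  if l ≤ (i : Int) then
    let ind : Int := (n : Int) - (r - (i : Int)) - 1
    let rem : Int := (i : Int) - l + 1
    let zind : Int := (z.getD ind.toNat none).getD 0
    if zind < rem then (z.set i (some zind), l, r)
    else if zind > rem then (z.set i (some rem), l, r)
    else
      let v : Int := rem + (cmiA s ((n : Int) - 1 - ((i : Int) - l) - 1) (l - 1) : Int)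
      (z.set i (some v), (i : Int) - v + 1, (i : Int))
  else
    let v : Int := (cmiA s ((n : Int) - 1) (i : Int) : Int)
    (z.set i (some v), (i : Int) - v + 1, (i : Int))

-- the loop 'for i in range(n-2, -1, -1)': fuel = number of remaining indices, current index = fuel-1
def zLoop (s : List Char) (n : Nat) : Nat → List (Option Int) → Int → Int → List (Option Int)
  | 0, z, _, _ => z
  | (k + 1), z, l, r =>
      let st := zStep s n k z l r
      zLoop s n k st.1 st.2.1 st.2.2

def z_suffix_base (st : String) : List (Option Int) :=
  let s := st.toList
  let n := s.length
  if n = 0 then List.replicate n none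
  else
    zLoop s n (n - 1) ((List.replicate n (none : Option Int)).set (n - 1) (some (n : Int)))
      ((n : Int) - 1) ((n : Int) - 1)

-- ===== PORT B =====
-- _overlap's while loop; j ≥ i always at every call site, so st[j] is in range whenever i ≥ 0 (getD exact)
def cmiB (s : List Char) (i j : Int) : Nat :=
  if h : 0 ≤ i then
    if s.getD i.toNat ' ' = s.getD j.toNat ' ' then cmiB s (i - 1) (j - 1) + 1 else 0
  else 0
termination_by (i + 1).toNat
decreasing_by omega

def z_suffix_base_alt (st : String) : List (Option Int) :=
  let s := st.toList
  (List.range s.length).map (fun (i : ℕ) => some ((cmiB s (i : Int) ((s.length : Int) - 1) : Int)))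

-- ===== PRECONDITION & SPEC =====
def Spec_z_suffix_base (st : String) (out : List (Option Int)) : Prop := out = z_suffix_base_alt st
instance (st : String) (out : List (Option Int)) : Decidable (Spec_z_suffix_base st out) := by unfold Spec_z_suffix_base; infer_instance

-- ===== CLAIM (what is proved, stated in full; the proofs are below) =====
def Claim_equal_z_suffix_base : Prop := ∀ (st : String), Dom_z_suffix_base st → Spec_z_suffix_base st (z_suffix_base st)

-- ===== LEMMAS AND PROOFS =====

-- every j < cmiA s a b is a successful comparison
lemma cmiA_matches (s : List Char) (a b : Int) :
    ∀ j : ℕ, j < cmiA s a b →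
      0 ≤ a - j ∧ 0 ≤ b - j ∧ s.getD (a - j).toNat ' ' = s.getD (b - j).toNat ' ' := by
  fun_induction cmiA s a b with
  | case1 a b h heq ih =>
      intro j hj
      cases j with
      | zero => simpa using ⟨h.1, h.2, heq⟩
      | succ jj =>
          have h2 := ih jj (by omega)
          have e1 : a - 1 - (jj : Int) = a - ((jj + 1 : ℕ) : Int) := by push_cast; ring
          have e2 : b - 1 - (jj : Int) = b - ((jj + 1 : ℕ) : Int) := by push_cast; ring
          rw [e1, e2] at h2
          exact h2
  | case2 a b h hne => intro j hj; omega
  | case3 a b h => intro j hj; omega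

-- cmiA stops exactly at the first failing comparison
lemma cmiA_stop (s : List Char) (a b : Int) :
    ¬ (0 ≤ a - (cmiA s a b : Int) ∧ 0 ≤ b - (cmiA s a b : Int) ∧
       s.getD (a - (cmiA s a b : Int)).toNat ' ' = s.getD (b - (cmiA s a b : Int)).toNat ' ') := by
  fun_induction cmiA s a b with
  | case1 a b h heq ih =>
      have e1 : a - ((cmiA s (a-1) (b-1) + 1 : ℕ) : Int) = a - 1 - (cmiA s (a-1) (b-1) : ℕ) := by push_cast; ring
      have e2 : b - ((cmiA s (a-1) (b-1) + 1 : ℕ) : Int) = b - 1 - (cmiA s (a-1) (b-1) : ℕ) := by push_cast; ring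
      rw [e1, e2]
      exact ih
  | case2 a b h hne => simpa using fun _ _ => hne
  | case3 a b h => intro hc; exact h ⟨by omega, by omega⟩

-- k successful comparisons can be peeled off the front
lemma cmiA_add (s : List Char) (k : ℕ) : ∀ (a b : Int),
    (∀ j : ℕ, j < k → 0 ≤ a - j ∧ 0 ≤ b - j ∧ s.getD (a - j).toNat ' ' = s.getD (b - j).toNat ' ') →
    cmiA s a b = k + cmiA s (a - k) (b - k) := by
  induction k with
  | zero => intro a b _; simp
  | succ k ih =>
      intro a b h
      have h0 := h 0 (by omega)
      simp only [Nat.cast_zero, sub_zero] at h0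
      obtain ⟨h0a, h0b, h0e⟩ := h0
      rw [cmiA, dif_pos ⟨h0a, h0b⟩, if_pos h0e]
      have h' : ∀ j : ℕ, j < k → 0 ≤ a - 1 - j ∧ 0 ≤ b - 1 - j ∧
          s.getD (a - 1 - j).toNat ' ' = s.getD (b - 1 - j).toNat ' ' := by
        intro j hj
        have := h (j + 1) (by omega)
        have e1 : a - ((j + 1 : ℕ) : Int) = a - 1 - j := by push_cast; ring
        have e2 : b - ((j + 1 : ℕ) : Int) = b - 1 - j := by push_cast; ring
        rw [e1, e2] at this; exact this
      rw [ih (a - 1) (b - 1) h']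
      have e1 : a - 1 - (k : Int) = a - ((k + 1 : ℕ) : Int) := by push_cast; ring
      have e2 : b - 1 - (k : Int) = b - ((k + 1 : ℕ) : Int) := by push_cast; ring
      rw [e1, e2]; omega

-- characterization: matches below k plus a failure at k pin the value
lemma cmiA_eq_of (s : List Char) (a b : Int) (k : ℕ)
    (h : ∀ j : ℕ, j < k → 0 ≤ a - j ∧ 0 ≤ b - j ∧ s.getD (a - j).toNat ' ' = s.getD (b - j).toNat ' ')
    (h2 : ¬ (0 ≤ a - (k : Int) ∧ 0 ≤ b - (k : Int) ∧
       s.getD (a - (k : Int)).toNat ' ' = s.getD (b - (k : Int)).toNat ' ')) :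
    cmiA s a b = k := by
  rw [cmiA_add s k a b h]
  suffices hz : cmiA s (a - k) (b - k) = 0 by omega
  rw [cmiA]
  split_ifs with hg he
  · exact absurd ⟨hg.1, hg.2, he⟩ h2
  · rfl
  · rfl

-- a positive cmiA is bounded by both starting indices plus one
lemma cmiA_le (s : List Char) (a b : Int) :
    cmiA s a b = 0 ∨ ((cmiA s a b : Int) ≤ a + 1 ∧ (cmiA s a b : Int) ≤ b + 1) := by
  rcases Nat.eq_zero_or_pos (cmiA s a b) with h | h
  · exact Or.inl h
  · have := cmiA_matches s a b (cmiA s a b - 1) (by omega)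
    right; omega

-- rewriting the (integer) index under getD
lemma gcast (s : List Char) (x y : Int) (h : x = y) :
    s.getD x.toNat ' ' = s.getD y.toNat ' ' := by rw [h]

-- B's helper agrees with A's (B omits the 0 ≤ j guard, valid when i ≤ j)
lemma cmiB_eq_cmiA (s : List Char) (a b : Int) (h : a ≤ b) : cmiB s a b = cmiA s b a := by
  fun_induction cmiB s a b with
  | case1 a b hg he ih =>
      rw [cmiA, dif_pos ⟨by omega, hg⟩, if_pos he.symm, ih (by omega)]
  | case2 a b hg hne =>
      rw [cmiA, dif_pos ⟨by omega, hg⟩, if_neg (fun hc => hne hc.symm)]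
  | case3 a b hg =>
      rw [cmiA, dif_neg (by omega)]

-- inside an exact Z-box [l,r], comparisons against the suffix transfer from the mirror index to i
lemma transfer (s : List Char) (l r kI : Int)
    (hkr : kI < r)
    (hbox : (cmiA s ((s.length : Int) - 1) r : Int) = r - l + 1)
    (m : ℕ) (hm : (m : Int) ≤ kI - l + 1)
    (hmz : m ≤ cmiA s ((s.length : Int) - 1) ((s.length : Int) - (r - kI) - 1)) :
    ∀ j : ℕ, j < m → 0 ≤ (s.length : Int) - 1 - j ∧ 0 ≤ kI - j ∧
      s.getD ((s.length : Int) - 1 - j).toNat ' ' = s.getD (kI - j).toNat ' ' := by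
  intro j hj
  have hind := cmiA_matches s ((s.length : Int) - 1) ((s.length : Int) - (r - kI) - 1) j (by omega)
  have hj'' : ((r - kI).toNat + j : ℕ) < cmiA s ((s.length : Int) - 1) r := by omega
  have hb := cmiA_matches s ((s.length : Int) - 1) r ((r - kI).toNat + j) hj''
  have e1 : (s.length : Int) - 1 - (((r - kI).toNat + j : ℕ) : Int)
      = (s.length : Int) - (r - kI) - 1 - (j : ℕ) := by omega
  have e2 : r - (((r - kI).toNat + j : ℕ) : Int) = kI - j := by omega
  refine ⟨by omega, by omega, ?_⟩
  exact hind.2.2.trans (((gcast s _ _ e1).symm.trans hb.2.2).trans (gcast s _ _ e2))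

-- main loop invariant: once all entries above the cursor hold the true suffix-Z values and the
-- current box (if it covers the cursor) is exact, the loop fills in all remaining true values
lemma zLoop_fill (s : List Char) :
    ∀ (fuel : Nat) (z : List (Option Int)) (l r : Int),
      fuel ≤ s.length - 1 →
      z.length = s.length →
      (∀ j : ℕ, fuel ≤ j → j < s.length →
        z[j]? = some (some ((cmiA s ((s.length : Int) - 1) (j : Int) : Int)))) →
      (l ≤ (fuel : Int) - 1 →
        ((fuel : Int) - 1 < r ∧ 0 ≤ l ∧ r ≤ (s.length : Int) - 2 ∧
         (cmiA s ((s.length : Int) - 1) r : Int) = r - l + 1)) →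
      zLoop s s.length fuel z l r =
        (List.range s.length).map (fun (j : ℕ) => some ((cmiA s ((s.length : Int) - 1) (j : Int) : Int))) := by
  intro fuel
  induction fuel with
  | zero =>
      intro z l r _ hlen hfill _
      rw [zLoop]
      apply List.ext_getElem?
      intro j
      by_cases hj : j < s.length
      · rw [hfill j (Nat.zero_le _) hj, List.getElem?_map, List.getElem?_range hj]
        rfl
      · rw [List.getElem?_eq_none (by omega), List.getElem?_eq_none (by simp; omega)]
  | succ k ih =>
      intro z l r hfn hlen hfill hbox
      have hkn : k < s.length := by omega
      have hkn2 : (k : Int) ≤ (s.length : Int) - 2 := by omega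
      rw [zLoop]
      by_cases hinb : l ≤ (k : Int)
      · -- in the box
        obtain ⟨hkr, hl0, hrn, hexact⟩ := hbox (by omega)
        have hkr' : (k : Int) < r := by push_cast at hkr; omega
        -- the mirror index and the stored value there
        have hind1 : 1 ≤ (s.length : Int) - (r - (k : Int)) - 1 := by omega
        have hindN : ((((s.length : Int) - (r - (k : Int)) - 1).toNat : ℕ) : Int)
            = (s.length : Int) - (r - (k : Int)) - 1 := by omega
        have hindk : k < ((s.length : Int) - (r - (k : Int)) - 1).toNat := by omega
        have hindlt : ((s.length : Int) - (r - (k : Int)) - 1).toNat < s.length := by omega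
        have hzind : (z.getD ((s.length : Int) - (r - (k : Int)) - 1).toNat none).getD 0
            = ((cmiA s ((s.length : Int) - 1) ((s.length : Int) - (r - (k : Int)) - 1) : ℕ) : Int) := by
          rw [List.getD_eq_getElem?_getD, hfill _ (by omega) hindlt, hindN]
          rfl
        have hrem1 : (1 : Int) ≤ (k : Int) - l + 1 := by omega
        -- common tail: once the step wrote the true value at k, recurse
        have main : ∀ (l' r' : Int),
            (l' ≤ (k : Int) - 1 →
              ((k : Int) - 1 < r' ∧ 0 ≤ l' ∧ r' ≤ (s.length : Int) - 2 ∧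
               (cmiA s ((s.length : Int) - 1) r' : Int) = r' - l' + 1)) →
            zLoop s s.length k
              (z.set k (some ((cmiA s ((s.length : Int) - 1) (k : Int) : ℕ) : Int))) l' r' =
            (List.range s.length).map
              (fun (j : ℕ) => some ((cmiA s ((s.length : Int) - 1) (j : Int) : Int))) := by
          intro l' r' hb'
          apply ih
          · omega
          · simpa using hlen
          · intro j hj hjn
            rcases Nat.eq_or_lt_of_le hj with h | h
            · rw [← h, List.getElem?_set_self (by omega)]
            · rw [List.getElem?_set_ne (by omega)]
              exact hfill j (by omega) hjn
          · intro hl'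
            exact hb' (by omega)
        by_cases hlt : ((cmiA s ((s.length : Int) - 1) ((s.length : Int) - (r - (k : Int)) - 1) : ℕ) : Int)
            < (k : Int) - l + 1
        · -- reuse case: Z(i) = Z(ind)
          have hZk : cmiA s ((s.length : Int) - 1) (k : Int)
              = cmiA s ((s.length : Int) - 1) ((s.length : Int) - (r - (k : Int)) - 1) := by
            refine cmiA_eq_of s ((s.length : Int) - 1) (k : Int)
              (cmiA s ((s.length : Int) - 1) ((s.length : Int) - (r - (k : Int)) - 1)) ?_ ?_
            · exact transfer s l r (k : Int) hkr' hexact _ (by omega) (le_refl _)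
            · rintro ⟨hs1, hs2, hs3⟩
              have hbound : (r - (k : Int)).toNat
                  + cmiA s ((s.length : Int) - 1) ((s.length : Int) - (r - (k : Int)) - 1)
                  < cmiA s ((s.length : Int) - 1) r := by omega
              have hbm := cmiA_matches s ((s.length : Int) - 1) r
                ((r - (k : Int)).toNat + cmiA s ((s.length : Int) - 1) ((s.length : Int) - (r - (k : Int)) - 1))
                hbound
              apply cmiA_stop s ((s.length : Int) - 1) ((s.length : Int) - (r - (k : Int)) - 1)
              refine ⟨by omega, by omega, ?_⟩
              have e1 : (s.length : Int) - (r - (k : Int)) - 1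
                    - (cmiA s ((s.length : Int) - 1) ((s.length : Int) - (r - (k : Int)) - 1) : Int)
                  = (s.length : Int) - 1
                    - (((r - (k : Int)).toNat
                        + cmiA s ((s.length : Int) - 1) ((s.length : Int) - (r - (k : Int)) - 1) : ℕ) : Int) := by
                omega
              have e2 : (k : Int)
                    - (cmiA s ((s.length : Int) - 1) ((s.length : Int) - (r - (k : Int)) - 1) : Int)
                  = r - (((r - (k : Int)).toNat
                        + cmiA s ((s.length : Int) - 1) ((s.length : Int) - (r - (k : Int)) - 1) : ℕ) : Int) := by
                omega
              exact hs3.trans (((gcast s _ _ e2).trans hbm.2.2.symm).trans (gcast s _ _ e1.symm))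
          have hstep : zStep s s.length k z l r
              = (z.set k (some ((cmiA s ((s.length : Int) - 1) (k : Int) : ℕ) : Int)), l, r) := by
            simp only [zStep, if_pos hinb, hzind]
            rw [if_pos hlt, ← hZk]
          rw [hstep]
          dsimp only
          apply main
          intro _
          exact ⟨by omega, hl0, hrn, hexact⟩
        · by_cases hgt : ((cmiA s ((s.length : Int) - 1) ((s.length : Int) - (r - (k : Int)) - 1) : ℕ) : Int) > (k : Int) - l + 1
          · -- the box covers more than the remainder: Z(k) = rem
            have hZk : cmiA s ((s.length : Int) - 1) (k : Int) = ((k : Int) - l + 1).toNat := by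
              refine cmiA_eq_of s ((s.length : Int) - 1) (k : Int) ((k : Int) - l + 1).toNat ?_ ?_
              · exact transfer s l r (k : Int) hkr' hexact _ (by omega) (by omega)
              · rintro ⟨t1, t2, t3⟩
                have hm2 := cmiA_matches s ((s.length : Int) - 1)
                  ((s.length : Int) - (r - (k : Int)) - 1) (((k : Int) - l + 1).toNat) (by omega)
                have ea : (s.length : Int) - 1 - ((cmiA s ((s.length : Int) - 1) r : ℕ) : Int)
                    = (s.length : Int) - (r - (k : Int)) - 1 - ((((k : Int) - l + 1).toNat : ℕ) : Int) := by
                  omega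
                have eb : (k : Int) - ((((k : Int) - l + 1).toNat : ℕ) : Int)
                    = r - ((cmiA s ((s.length : Int) - 1) r : ℕ) : Int) := by
                  omega
                apply cmiA_stop s ((s.length : Int) - 1) r
                refine ⟨by omega, by omega, ?_⟩
                exact ((gcast s _ _ ea).trans hm2.2.2.symm).trans (t3.trans (gcast s _ _ eb))
            have hcast : ((cmiA s ((s.length : Int) - 1) (k : Int) : ℕ) : Int) = (k : Int) - l + 1 := by
              rw [hZk]; omega
            have hstep : zStep s s.length k z l r
                = (z.set k (some ((cmiA s ((s.length : Int) - 1) (k : Int) : ℕ) : Int)), l, r) := by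
              simp only [zStep, if_pos hinb, hzind]
              rw [if_neg hlt, if_pos hgt, ← hcast]
            rw [hstep]
            dsimp only
            apply main
            intro _
            exact ⟨by omega, hl0, hrn, hexact⟩
          · -- exact fit: extend by explicit comparisons past the box
            have hmatches := transfer s l r (k : Int) hkr' hexact (cmiA s ((s.length : Int) - 1) ((s.length : Int) - (r - (k : Int)) - 1)) (by omega) (le_refl _)
            have hval := cmiA_add s (cmiA s ((s.length : Int) - 1) ((s.length : Int) - (r - (k : Int)) - 1)) ((s.length : Int) - 1) (k : Int) hmatches
            have ea : (s.length : Int) - 1 - ((cmiA s ((s.length : Int) - 1) ((s.length : Int) - (r - (k : Int)) - 1) : ℕ) : Int)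
                = (s.length : Int) - 1 - ((k : Int) - l) - 1 := by omega
            have eb : (k : Int) - ((cmiA s ((s.length : Int) - 1) ((s.length : Int) - (r - (k : Int)) - 1) : ℕ) : Int) = l - 1 := by omega
            rw [ea, eb] at hval
            have hcast : ((cmiA s ((s.length : Int) - 1) (k : Int) : ℕ) : Int)
                = ((k : Int) - l + 1)
                  + ((cmiA s ((s.length : Int) - 1 - ((k : Int) - l) - 1) (l - 1) : ℕ) : Int) := by
              rw [hval]; omega
            have hstep : zStep s s.length k z l r
                = (z.set k (some ((cmiA s ((s.length : Int) - 1) (k : Int) : ℕ) : Int)),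
                   (k : Int) - ((cmiA s ((s.length : Int) - 1) (k : Int) : ℕ) : Int) + 1, (k : Int)) := by
              simp only [zStep, if_pos hinb, hzind]
              rw [if_neg hlt, if_neg hgt, ← hcast]
            rw [hstep]
            dsimp only
            apply main
            intro hl'
            have hle := cmiA_le s ((s.length : Int) - 1) (k : Int)
            refine ⟨by omega, by omega, by omega, by ring⟩
      · -- not in the box: direct scan
        have hstep : zStep s s.length k z l r
            = (z.set k (some ((cmiA s ((s.length : Int) - 1) (k : Int) : ℕ) : Int)),
               (k : Int) - ((cmiA s ((s.length : Int) - 1) (k : Int) : ℕ) : Int) + 1, (k : Int)) := by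
          simp only [zStep, if_neg hinb]
        rw [hstep]
        dsimp only
        apply ih
        · omega
        · simpa using hlen
        · intro j hj hjn
          rcases Nat.eq_or_lt_of_le hj with h | h
          · rw [← h, List.getElem?_set_self (by omega)]
          · rw [List.getElem?_set_ne (by omega)]
            exact hfill j (by omega) hjn
        · intro hl'
          have hZ := cmiA_le s ((s.length : Int) - 1) (k : Int)
          refine ⟨by omega, by omega, by omega, by ring⟩

-- ===== VERDICT (by name: the statement is the Claim_ definition above) =====
theorem z_suffix_base_spec : Claim_equal_z_suffix_base := by
  intro st _
  show z_suffix_base st = z_suffix_base_alt st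
  unfold z_suffix_base z_suffix_base_alt
  dsimp only
  by_cases h0 : st.toList.length = 0
  · simp [h0]
  · rw [if_neg h0]
    have h1 : 1 ≤ st.toList.length := by omega
    have hZlast : cmiA st.toList ((st.toList.length : Int) - 1) ((st.toList.length : Int) - 1)
        = st.toList.length := by
      rw [cmiA_add st.toList st.toList.length ((st.toList.length : Int) - 1)
           ((st.toList.length : Int) - 1) (fun j hj => ⟨by omega, by omega, rfl⟩)]
      rw [cmiA, dif_neg (by omega)]
      omega
    have hfills : ∀ j : ℕ, st.toList.length - 1 ≤ j → j < st.toList.length →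
        ((List.replicate st.toList.length (none : Option Int)).set (st.toList.length - 1)
          (some (st.toList.length : Int)))[j]? =
        some (some ((cmiA st.toList ((st.toList.length : Int) - 1) (j : Int) : ℕ) : Int)) := by
      intro j hj hjn
      have hj' : j = st.toList.length - 1 := by omega
      subst hj'
      rw [List.getElem?_set_self
        (by rw [List.length_replicate]; omega)]
      have ej : ((st.toList.length - 1 : ℕ) : Int) = (st.toList.length : Int) - 1 := by omega
      rw [ej, hZlast]
    rw [zLoop_fill st.toList (st.toList.length - 1)
        ((List.replicate st.toList.length (none : Option Int)).set (st.toList.length - 1)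
          (some (st.toList.length : Int)))
        ((st.toList.length : Int) - 1) ((st.toList.length : Int) - 1)
        (by omega) (by simp) hfills (by intro hl; exfalso; omega)]
    apply List.map_congr_left
    intro i hi
    have hi' : i < st.toList.length := List.mem_range.mp hi
    rw [cmiB_eq_cmiA st.toList (i : Int) ((st.toList.length : Int) - 1) (by omega)]
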